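-- pv_equiv track=rewrite | github.com/uchicago-dsi/prima | ops/deduplicate_disk.py | choose_preferred_exam
-- ===== SOURCE A (Python) =====
-- from typing import Dict, List, Set, Tuple
--
-- def extract_accession_from_exam_name(exam_name: str) -> str:
--     """Extract accession number from exam directory name.
--
--     Exam names can be:
--     - "2O42657" (just accession)
--     - "2O42657-2015-12-08" (accession-date)
--
--     Returns the accession number (part before first dash).
--     """
--     return exam_name.split("-")[0]
--
-- def choose_preferred_exam(
--     exam_names: Set[str],
--     patient_id: str,
--     ibroker_accessions: Dict[str, Set[str]],
-- ) -> str: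
--     """Choose which exam to keep from a duplicate group.
--
--     Prefers exams with accession numbers from iBroker metadata.
--     If multiple exams have iBroker accessions, prefers lexicographically greater (more recent).
--     If none have iBroker accessions, falls back to lexicographically greater.
--
--     Parameters
--     ----------
--     exam_names : Set[str]
--         set of exam directory names that are duplicates
--     patient_id : str
--         patient ID
--     ibroker_accessions : Dict[str, Set[str]]
--         mapping of patient_id -> set of accession numbers from iBroker
--
--     Returns
--     -------
--     str
--         exam name to keep
--     """
--     patient_accessions = ibroker_accessions.get(patient_id, set())
--
--     # extract accession numbers from exam names
--     exam_to_accession = {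
--         name: extract_accession_from_exam_name(name) for name in exam_names
--     }
--
--     # find exams that match iBroker accessions
--     ibroker_matches = [
--         name for name, acc in exam_to_accession.items() if acc in patient_accessions
--     ]
--
--     if ibroker_matches:
--         # prefer iBroker matches, choose lexicographically greatest (most recent)
--         return max(ibroker_matches)
--
--     # no iBroker matches, fall back to lexicographically greatest
--     return max(exam_names)
-- ===== SOURCE B (Python) =====
-- def extract_accession_from_exam_name(exam_name: str) -> str:
--     return exam_name.split("-")[0]
--
--
-- def choose_preferred_exam(exam_names, patient_id, ibroker_accessions):
--     """Sort-then-scan: sort the names descending once, then the first name whose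
--     accession is in the patient's iBroker set is the answer; with no match the
--     first (greatest) sorted name is. Correct because a descending scan meets the
--     lexicographically greatest matching name first."""
--     patient_accessions = ibroker_accessions.get(patient_id, set())
--     ordered = sorted(exam_names, reverse=True)
--     for name in ordered:
--         if extract_accession_from_exam_name(name) in patient_accessions:
--             return name
--     return ordered[0]
-- ===== Notes on version B (the rewrite author's own statement) =====
-- stated objective: alternative
-- what changed: A builds a name-to-accession dict, materialises the list of iBroker-matching names and calls max() on it or on the whole set; B sorts the names descending once and returns the first name in that order whose accession matches, falling back to the sorted head.
import Mathlib
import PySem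

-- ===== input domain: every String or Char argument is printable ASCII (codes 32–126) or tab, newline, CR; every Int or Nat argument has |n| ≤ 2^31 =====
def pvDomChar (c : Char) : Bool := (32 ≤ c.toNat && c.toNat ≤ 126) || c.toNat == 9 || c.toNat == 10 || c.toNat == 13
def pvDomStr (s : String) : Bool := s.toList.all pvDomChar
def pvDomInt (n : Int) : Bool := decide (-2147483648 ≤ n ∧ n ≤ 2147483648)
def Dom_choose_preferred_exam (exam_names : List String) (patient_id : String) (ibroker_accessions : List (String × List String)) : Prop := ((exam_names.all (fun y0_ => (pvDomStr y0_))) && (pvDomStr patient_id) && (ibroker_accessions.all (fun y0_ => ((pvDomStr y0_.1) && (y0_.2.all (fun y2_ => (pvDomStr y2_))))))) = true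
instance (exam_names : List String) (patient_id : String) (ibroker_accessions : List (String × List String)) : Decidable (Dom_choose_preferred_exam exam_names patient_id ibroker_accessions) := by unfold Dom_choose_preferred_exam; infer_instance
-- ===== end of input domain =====

-- B replaces A's dict comprehension + filtered match list + max() calls by sorting the names
-- in descending order once and scanning for the first iBroker-matching name (fallback: the
-- sorted head); objective: an alternative sort-then-scan algorithm (no speed claim).

-- ===== PORT A =====
-- helper from the same module: exam_name.split("-")[0]
def pvExtract (s : String) : String :=
  PySem.List.pyGetD ((PySem.Str.split? s "-").getD []) 0 ""

def choose_preferred_exam (exam_names : List String) (patient_id : String) (ibroker_accessions : List (String × List String)) : String :=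
  let patient_accessions : PySem.Set String := (PySem.Dict.mk ibroker_accessions).getD patient_id PySem.Set.empty
  let exam_to_accession : PySem.Dict String String :=
    PySem.Dict.ofList (exam_names.map (fun name => (name, pvExtract name)))
  let ibroker_matches : List String :=
    (exam_to_accession.items.filter (fun p => PySem.Set.contains patient_accessions p.2)).map (fun p => p.1)
  if ibroker_matches ≠ [] then (PySem.List.max? ibroker_matches (fun y => y)).getD ""
  else (PySem.List.max? exam_names (fun y => y)).getD ""

-- ===== PORT B =====
def choose_preferred_exam_alt (exam_names : List String) (patient_id : String) (ibroker_accessions : List (String × List String)) : String :=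
  let patient_accessions : PySem.Set String := (PySem.Dict.mk ibroker_accessions).getD patient_id PySem.Set.empty
  let ordered : List String := PySem.List.sorted exam_names (fun x => x) true
  -- the for-loop with early return is List.find?
  match ordered.find? (fun name => PySem.Set.contains patient_accessions (pvExtract name)) with
  | some name => name
  | none => PySem.List.pyGetD ordered 0 ""   -- ordered[0]; Python raises IndexError on empty, outside Pre_

-- ===== PRECONDITION & SPEC =====
-- Pre_ excludes only the empty exam set, on which A's max() raises ValueError (and B's ordered[0] raises IndexError).
def Pre_choose_preferred_exam (exam_names : List String) (patient_id : String) (ibroker_accessions : List (String × List String)) : Prop :=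
  exam_names ≠ []
instance (exam_names : List String) (patient_id : String) (ibroker_accessions : List (String × List String)) : Decidable (Pre_choose_preferred_exam exam_names patient_id ibroker_accessions) := by unfold Pre_choose_preferred_exam; infer_instance

def pvWitness_choose_preferred_exam : List String × String × (List (String × List String)) :=
  (["2O42657-2015-12-08", "2O42657"], "p1", [("p1", ["2O42657"])])

def Spec_choose_preferred_exam (exam_names : List String) (patient_id : String) (ibroker_accessions : List (String × List String)) (out : String) : Prop := out = choose_preferred_exam_alt exam_names patient_id ibroker_accessions
instance (exam_names : List String) (patient_id : String) (ibroker_accessions : List (String × List String)) (out : String) : Decidable (Spec_choose_preferred_exam exam_names patient_id ibroker_accessions out) := by unfold Spec_choose_preferred_exam; infer_instance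

-- ===== CLAIM (what is proved, stated in full; the proofs are below) =====
def Claim_equal_choose_preferred_exam : Prop := ∀ (exam_names : List String) (patient_id : String) (ibroker_accessions : List (String × List String)), Dom_choose_preferred_exam exam_names patient_id ibroker_accessions → Pre_choose_preferred_exam exam_names patient_id ibroker_accessions → Spec_choose_preferred_exam exam_names patient_id ibroker_accessions (choose_preferred_exam exam_names patient_id ibroker_accessions)

-- ===== LEMMAS AND PROOFS =====

theorem pv_max?_id_eq_some_iff (xs : List String) (m : String) :
    PySem.List.max? xs (fun y => y) = some m ↔ m ∈ xs ∧ ∀ y ∈ xs, y ≤ m := by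
  constructor
  · intro h
    exact ⟨PySem.List.max?_mem h, fun y hy => PySem.List.max?_isMax h y hy⟩
  · rintro ⟨hm, hmax⟩
    rcases h0 : PySem.List.max? xs (fun y => y) with _ | m0
    · rw [PySem.List.max?_eq_none_iff] at h0
      subst h0; cases hm
    · have h1 : m0 ∈ xs := PySem.List.max?_mem h0
      have h2 : m ≤ m0 := PySem.List.max?_isMax h0 m hm
      have h3 : m0 ≤ m := hmax m0 h1
      rw [le_antisymm h3 h2]

theorem pv_max?_id_congr (xs ys : List String) (h : ∀ a, a ∈ xs ↔ a ∈ ys) :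
    PySem.List.max? xs (fun y => y) = PySem.List.max? ys (fun y => y) := by
  rcases h0 : PySem.List.max? xs (fun y => y) with _ | m
  · rw [PySem.List.max?_eq_none_iff] at h0
    subst h0
    symm
    rw [PySem.List.max?_eq_none_iff]
    rw [List.eq_nil_iff_forall_not_mem]
    intro a ha
    exact (List.not_mem_nil) ((h a).mpr ha)
  · symm
    rw [pv_max?_id_eq_some_iff] at h0 ⊢
    exact ⟨(h m).mp h0.1, fun y hy => h0.2 y ((h y).mpr hy)⟩

-- on a descending list, the first element satisfying P is the (first) maximum of the P-filter
theorem pv_find_desc (P : String → Bool) :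
    ∀ l : List String, l.Pairwise (fun a b => b ≤ a) →
      l.find? P = PySem.List.max? (l.filter P) (fun y => y) := by
  intro l
  induction l with
  | nil => intro _; rfl
  | cons x t ih =>
    intro hp
    rcases List.pairwise_cons.mp hp with ⟨hx, ht⟩
    by_cases h : P x = true
    · rw [List.filter_cons_of_pos h]
      simp only [List.find?, h]
      symm
      rw [pv_max?_id_eq_some_iff]
      refine ⟨List.mem_cons_self, ?_⟩
      intro y hy
      rcases List.mem_cons.mp hy with rfl | hy
      · exact le_refl _
      · exact hx y (List.mem_of_mem_filter hy)
    · have h' : P x = false := by simpa using h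
      rw [List.filter_cons_of_neg (by simp [h'])]
      simp only [List.find?, h']
      exact ih ht

-- the dict {name: v(name) for name in l} has items = (first-occurrence dedup of l).map (n, v n)
theorem pv_items_keyed (v : String → String) :
    ∀ (l : List String) (d : PySem.Dict String String) (S : List String),
      d.items = S.map (fun n => (n, v n)) →
      (l.foldl (fun d n => d.insert n (v n)) d).items
        = (l.foldl PySem.Set.add S).map (fun n => (n, v n)) := by
  intro l
  induction l with
  | nil => intro d S h; simpa using h
  | cons x t ih =>
    intro d S h
    have hkeys : d.keys = S := by
      simp [PySem.Dict.keys, h, Function.comp_def]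
    have hcont : d.contains x = decide (x ∈ S) := by
      rw [PySem.Dict.contains_eq_decide_mem_keys, hkeys]
    by_cases hx : x ∈ S
    · have hc : d.contains x = true := by simp [hcont, hx]
      have hitems : (d.insert x (v x)).items = S.map (fun n => (n, v n)) := by
        rw [PySem.Dict.items_insert_of_contains d (v x) hc, h, List.map_map]
        apply List.map_congr_left
        intro n _
        by_cases hn : n = x
        · subst hn; simp
        · simp [hn]
      have hadd : PySem.Set.add S x = S := by
        simp [PySem.Set.add, PySem.Set.contains, hx]
      simp only [List.foldl_cons, hadd]
      exact ih _ S hitems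
    · have hc : d.contains x = false := by simp [hcont, hx]
      have hitems : (d.insert x (v x)).items = (S ++ [x]).map (fun n => (n, v n)) := by
        rw [PySem.Dict.items_insert_of_not_contains d (v x) hc, h]
        simp
      have hadd : PySem.Set.add S x = S ++ [x] := by
        simp [PySem.Set.add, PySem.Set.contains, hx]
      simp only [List.foldl_cons, hadd]
      exact ih _ (S ++ [x]) hitems

-- ===== VERDICT (by name: the statement is the Claim_ definition above) =====
theorem choose_preferred_exam_spec : Claim_equal_choose_preferred_exam := by
  intro exam_names patient_id ibroker_accessions _ hpre
  unfold Spec_choose_preferred_exam choose_preferred_exam choose_preferred_exam_alt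
  dsimp only
  generalize (PySem.Dict.mk ibroker_accessions).getD patient_id PySem.Set.empty = pacc
  set Q : String → Bool := fun n => PySem.Set.contains pacc (pvExtract n) with hQ
  -- A's match list is the filtered first-occurrence dedup of exam_names
  have hitems : (PySem.Dict.ofList (exam_names.map (fun name => (name, pvExtract name)))).items
      = (PySem.Set.ofList exam_names).map (fun n => (n, pvExtract n)) := by
    have h0 : PySem.Dict.ofList (exam_names.map (fun name => (name, pvExtract name)))
        = (exam_names.map (fun name => (name, pvExtract name))).foldl
            (fun d p => d.insert p.1 p.2) PySem.Dict.empty := rfl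
    rw [h0, List.foldl_map]
    have := pv_items_keyed pvExtract exam_names PySem.Dict.empty [] (by rfl)
    simpa [PySem.Set.ofList_eq_foldl] using this
  have hmatches :
      (((PySem.Dict.ofList (exam_names.map (fun name => (name, pvExtract name)))).items.filter
          (fun p => PySem.Set.contains pacc p.2)).map (fun p => p.1))
      = (PySem.Set.ofList exam_names).filter Q := by
    rw [hitems, List.filter_map, List.map_map]
    simp [Function.comp_def, hQ]
  rw [hmatches]
  -- B's scan over the descending sort is the max of the filtered sorted list
  set ordered : List String := PySem.List.sorted exam_names (fun x => x) true with hord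
  have hdesc : ordered.Pairwise (fun a b => b ≤ a) := by
    simpa using PySem.List.sorted_pairwise_rev exam_names (fun x => x)
  rw [pv_find_desc Q ordered hdesc]
  -- the two candidate pools contain the same elements
  have hmem : ∀ a, a ∈ (PySem.Set.ofList exam_names).filter Q ↔ a ∈ ordered.filter Q := by
    intro a
    simp [List.mem_filter, PySem.Set.mem_ofList, hord, PySem.List.mem_sorted]
  have hmax : PySem.List.max? ((PySem.Set.ofList exam_names).filter Q) (fun y => y)
      = PySem.List.max? (ordered.filter Q) (fun y => y) := pv_max?_id_congr _ _ hmem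
  by_cases hne : (PySem.Set.ofList exam_names).filter Q = []
  · -- no iBroker matches on either side
    have hof : PySem.List.max? (ordered.filter Q) (fun y => y) = none := by
      rw [← hmax, hne]
      exact (PySem.List.max?_eq_none_iff _ _).mpr rfl
    rw [if_neg (by simpa using hne), hof]
    -- B returns the sorted head; show it is max(exam_names)
    rcases ho : ordered with _ | ⟨m, t⟩
    · exact absurd ((PySem.List.sorted_eq_nil_iff _ _ _).mp (hord ▸ ho)) hpre
    · have hmmem : m ∈ exam_names := by
        have : m ∈ ordered := by rw [ho]; exact List.mem_cons_self
        simpa [hord, PySem.List.mem_sorted] using this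
      have hge : ∀ y ∈ exam_names, y ≤ m :=
        PySem.List.key_head_sorted_rev_ge exam_names (fun x => x) (hord.symm.trans ho)
      have : PySem.List.max? exam_names (fun y => y) = some m :=
        (pv_max?_id_eq_some_iff _ _).mpr ⟨hmmem, hge⟩
      simp [this, PySem.List.pyGetD, PySem.List.pyGet?, PySem.List.pyIdx?]
  · -- there are matches; both return the maximum of the match pool
    rcases h0 : PySem.List.max? ((PySem.Set.ofList exam_names).filter Q) (fun y => y) with _ | m
    · rw [PySem.List.max?_eq_none_iff] at h0
      exact absurd h0 hne
    · rw [hmax] at h0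
      rw [if_pos hne, h0]
      rfl
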